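-- pv_equiv track=rewrite | github.com/rxufck-oss/tlgmusic | bot.py | slugify_sc_user
-- ===== SOURCE A (Python) =====
-- def slugify_sc_user(name: str) -> str:
--     cleaned = []
--     prev_dash = False
--     for ch in (name or "").lower().strip():
--         if ch.isalnum():
--             cleaned.append(ch)
--             prev_dash = False
--         elif ch in (" ", "-", "_"):
--             if not prev_dash:
--                 cleaned.append("-")
--                 prev_dash = True
--     slug = "".join(cleaned).strip("-")
--     return slug
-- ===== SOURCE B (Python) =====
-- def slugify_sc_user(name: str) -> str:
--     s = (name or "").lower().strip()
--     words = "".join(ch if ch.isalnum() else " " for ch in s if ch.isalnum() or ch in " -_").split()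
--     return "-".join(words)
-- ===== Notes on version B (the rewrite author's own statement) =====
-- stated objective: idiomatic
-- what changed: Replaces the prev_dash state machine and trailing strip('-') with the idiomatic filter/map-to-spaces comprehension followed by '-'.join(s.split()), which collapses separator runs and trims edge separators in one standard-library idiom.
import Mathlib
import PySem

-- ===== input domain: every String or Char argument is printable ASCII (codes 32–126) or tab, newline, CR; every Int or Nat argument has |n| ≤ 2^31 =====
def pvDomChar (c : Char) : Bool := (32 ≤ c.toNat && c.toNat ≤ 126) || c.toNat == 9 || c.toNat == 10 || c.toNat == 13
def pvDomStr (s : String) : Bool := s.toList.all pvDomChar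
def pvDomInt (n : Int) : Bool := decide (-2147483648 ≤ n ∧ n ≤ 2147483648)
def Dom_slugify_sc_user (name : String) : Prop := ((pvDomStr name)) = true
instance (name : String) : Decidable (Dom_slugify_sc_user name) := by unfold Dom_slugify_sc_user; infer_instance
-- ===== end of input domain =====

-- B replaces A's prev_dash state machine and trailing strip('-') with the idiomatic
-- filter/map-to-spaces comprehension followed by "-".join(s.split()); same result, same O(n) cost.


-- ===== PORT A =====
-- the for-loop over (name or "").lower().strip() with its prev_dash flag
-- ('name or ""' is the identity on strings: the empty string stays empty)
def slugifyLoopA : List Char → Bool → List Char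
  | [], _ => []
  | ch :: rest, prevDash =>
    if PySem.Chars.isalnum ch then ch :: slugifyLoopA rest false
    else if ch == ' ' || ch == '-' || ch == '_' then
      (if !prevDash then '-' :: slugifyLoopA rest true else slugifyLoopA rest true)
    else slugifyLoopA rest prevDash


def slugify_sc_user (name : String) : String :=
  let s := PySem.Str.strip (PySem.Str.lower name)
  PySem.Str.stripChars (String.ofList (slugifyLoopA s.toList false)) "-"

-- ===== PORT B =====
def slugify_sc_user_alt (name : String) : String :=
  let s := PySem.Str.strip (PySem.Str.lower name)
  -- "".join(ch if ch.isalnum() else " " for ch in s if ch.isalnum() or ch in " -_")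
  let mapped := (s.toList.filter
      (fun ch => PySem.Chars.isalnum ch || ch == ' ' || ch == '-' || ch == '_')).map
      (fun ch => if PySem.Chars.isalnum ch then ch else ' ')
  -- "-".join(….split())
  String.ofList (PySem.Chars.join ['-'] (PySem.Chars.split₀ mapped))

-- ===== PRECONDITION & SPEC =====
def Spec_slugify_sc_user (name : String) (out : String) : Prop := out = slugify_sc_user_alt name
instance (name : String) (out : String) : Decidable (Spec_slugify_sc_user name out) := by unfold Spec_slugify_sc_user; infer_instance

-- ===== CLAIM (what is proved, stated in full; the proofs are below) =====
def Claim_equal_slugify_sc_user : Prop := ∀ (name : String), Dom_slugify_sc_user name → Spec_slugify_sc_user name (slugify_sc_user name)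

-- ===== LEMMAS AND PROOFS =====

def okCh (c : Char) : Prop := PySem.Chars.isalnum c = true ∨ c = ' '

def go2 : List Char → Bool → List Char
  | [], _ => []
  | c :: t, p =>
    if c == ' ' then (if !p then '-' :: go2 t true else go2 t true) else c :: go2 t false

def wordsR : List Char → List (List Char)
  | [] => []
  | c :: t =>
    if PySem.Chars.isspace c then wordsR t
    else (c :: t.takeWhile (fun x => !PySem.Chars.isspace x)) ::
         wordsR (t.dropWhile (fun x => !PySem.Chars.isspace x))
  termination_by l => l.length
  decreasing_by
    · simp
    · exact Nat.lt_succ_of_le (List.length_dropWhile_le _ _)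

def rstripD (l : List Char) : List Char :=
  (l.reverse.dropWhile (fun c => ['-'].contains c)).reverse

theorem alnum_not_space {c : Char} (h : PySem.Chars.isalnum c = true) :
    PySem.Chars.isspace c = false := by
  simp only [PySem.Chars.isalnum, PySem.Chars.isalpha, PySem.Chars.isdigit,
    PySem.Chars.isupper, PySem.Chars.islower, PySem.Chars.isspace,
    Bool.or_eq_true, Bool.and_eq_true, decide_eq_true_eq,
    Char.le_def, UInt32.le_iff_toNat_le, Char.toNat] at h ⊢
  have e0 : ('0').val.toNat = 48 := rfl
  have e9 : ('9').val.toNat = 57 := rfl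
  have eA : ('A').val.toNat = 65 := rfl
  have eZ : ('Z').val.toNat = 90 := rfl
  have ea : ('a').val.toNat = 97 := rfl
  have ez : ('z').val.toNat = 122 := rfl
  simp only [Bool.or_eq_false_iff, Bool.and_eq_false_iff, decide_eq_false_iff_not]
  omega

theorem alnum_ne_space {c : Char} (h : PySem.Chars.isalnum c = true) : (c == ' ') = false := by
  cases hc : c == ' ' with
  | false => rfl
  | true =>
    rw [beq_iff_eq] at hc; subst hc
    exact absurd h (by decide)

theorem alnum_ne_dash {c : Char} (h : PySem.Chars.isalnum c = true) : c ≠ '-' := by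
  intro hc; subst hc; exact absurd h (by decide)

theorem space_isspace : PySem.Chars.isspace ' ' = true := by decide

-- L1
def mappedOf (cs : List Char) : List Char :=
  (cs.filter (fun ch => PySem.Chars.isalnum ch || ch == ' ' || ch == '-' || ch == '_')).map
    (fun ch => if PySem.Chars.isalnum ch then ch else ' ')

-- L3 helpers
theorem split0_go_eq (m cur : List Char) (acc : List (List Char)) :
    PySem.Chars.split₀.go m cur acc =
      acc.reverse ++ (if cur.isEmpty then wordsR m
        else (cur.reverse ++ m.takeWhile (fun x => !PySem.Chars.isspace x)) ::
             wordsR (m.dropWhile (fun x => !PySem.Chars.isspace x))) := by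
  induction m generalizing cur acc with
  | nil =>
    rw [PySem.Chars.split₀.go]
    cases cur with
    | nil => simp [wordsR]
    | cons a l => simp [show wordsR ([] : List Char) = [] from by rw [wordsR]]
  | cons c t ih =>
    rw [PySem.Chars.split₀.go]
    by_cases hs : PySem.Chars.isspace c = true
    · cases cur with
      | nil =>
        rw [if_pos hs, if_pos (by simp), ih, wordsR]
        simp [hs]
      | cons a l =>
        rw [if_pos hs, if_neg (by simp), ih]
        simp only [List.isEmpty_nil, if_pos, List.reverse_cons, List.takeWhile_cons,
          List.dropWhile_cons, hs, Bool.not_true, Bool.false_eq_true, if_false,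
          List.append_assoc, List.append_nil]
        rw [show wordsR (c :: t) = wordsR t from by rw [wordsR]; simp [hs]]
        simp
    · have hs' : PySem.Chars.isspace c = false := by simpa using hs
      rw [if_neg (by simp [hs']), ih]
      cases cur with
      | nil =>
        rw [show wordsR (c :: t) = (c :: t.takeWhile (fun x => !PySem.Chars.isspace x)) ::
              wordsR (t.dropWhile (fun x => !PySem.Chars.isspace x)) by rw [wordsR]; simp [hs']]
        simp
      | cons a l =>
        simp [List.takeWhile_cons, List.dropWhile_cons, hs']

theorem split0_eq_wordsR (m : List Char) : PySem.Chars.split₀ m = wordsR m := by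
  rw [PySem.Chars.split₀, split0_go_eq]; simp

-- go2 lemmas
theorem go2_true_eq (m : List Char) :
    go2 m true = go2 (m.dropWhile (fun x => x == ' ')) false := by
  induction m with
  | nil => rfl
  | cons c t ih =>
    by_cases hc : (c == ' ') = true
    · simp [go2, hc, List.dropWhile_cons, ih]
    · have hc' : (c == ' ') = false := by simpa using hc
      simp [go2, hc', List.dropWhile_cons]

theorem go2_word (w r : List Char) (hw : ∀ a ∈ w, (a == ' ') = false) :
    go2 (w ++ r) false = w ++ go2 r false := by
  induction w with
  | nil => rfl
  | cons a l ih =>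
    have ha := hw a (List.mem_cons_self ..)
    simp only [List.cons_append, go2, ha, Bool.false_eq_true, if_false]
    rw [ih (fun x hx => hw x (List.mem_cons_of_mem _ hx))]

-- wordsR lemmas
theorem wordsR_space_cons (t : List Char) : wordsR (' ' :: t) = wordsR t := by
  rw [wordsR]; simp [space_isspace]

theorem wordsR_dropWhile_space (t : List Char) :
    wordsR (t.dropWhile (fun x => x == ' ')) = wordsR t := by
  induction t with
  | nil => rfl
  | cons c t ih =>
    by_cases hc : (c == ' ') = true
    · have : c = ' ' := by simpa using hc
      subst this
      rw [List.dropWhile_cons]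
      simp only [hc, if_pos]
      rw [ih, wordsR_space_cons]
    · have hc' : (c == ' ') = false := by simpa using hc
      rw [List.dropWhile_cons]
      simp [hc']

theorem takeWhile_congr_ok (l : List Char) (hok : ∀ c ∈ l, okCh c) :
    l.takeWhile (fun x => !PySem.Chars.isspace x) = l.takeWhile (fun x => !(x == ' ')) := by
  induction l with
  | nil => rfl
  | cons c t ih =>
    have hc := hok c (List.mem_cons_self ..)
    have ht := fun x hx => hok x (List.mem_cons_of_mem _ hx)
    rcases hc with h | h
    · simp [List.takeWhile_cons, alnum_not_space h, alnum_ne_space h, ih ht]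
    · subst h; simp [List.takeWhile_cons, space_isspace]

theorem dropWhile_congr_ok (l : List Char) (hok : ∀ c ∈ l, okCh c) :
    l.dropWhile (fun x => !PySem.Chars.isspace x) = l.dropWhile (fun x => !(x == ' ')) := by
  induction l with
  | nil => rfl
  | cons c t ih =>
    have hc := hok c (List.mem_cons_self ..)
    have ht := fun x hx => hok x (List.mem_cons_of_mem _ hx)
    rcases hc with h | h
    · simp [List.dropWhile_cons, alnum_not_space h, alnum_ne_space h, ih ht]
    · subst h; simp [List.dropWhile_cons, space_isspace]

-- rstrip lemmas
theorem dropWhile_head_false {α : Type} (p : α → Bool) (l l' : List α) (a : α)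
    (h : l.dropWhile p = a :: l') : p a = false := by
  induction l with
  | nil => simp at h
  | cons b t ih =>
    rw [List.dropWhile_cons] at h
    by_cases hb : p b = true
    · rw [if_pos hb] at h; exact ih h
    · rw [if_neg hb] at h
      cases h; simpa using hb

theorem rstripD_ne_nil {l : List Char} {a : Char} (ha : a ∈ l) (hp : (['-'].contains a) = false) :
    rstripD l ≠ [] := by
  intro h
  rw [rstripD] at h
  have h2 : l.reverse.dropWhile (fun c => ['-'].contains c) = [] := by
    have := congrArg List.reverse h
    simpa using this
  have := List.dropWhile_eq_nil_iff.mp h2 a (by simpa using ha)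
  rw [hp] at this; exact absurd this (by simp)

theorem rstripD_append {x z : List Char} (hz : rstripD z ≠ []) :
    rstripD (x ++ z) = x ++ rstripD z := by
  have hne : (z.reverse.dropWhile (fun c => ['-'].contains c)).isEmpty = false := by
    rw [List.isEmpty_eq_false_iff]
    intro h; exact hz (by rw [rstripD, h]; rfl)
  rw [rstripD, List.reverse_append, List.dropWhile_append, if_neg (by rw [hne]; simp)]
  simp [rstripD]

theorem rstripD_append_dash (x : List Char) : rstripD (x ++ ['-']) = rstripD x := by
  rw [rstripD, List.reverse_append]
  simp [rstripD]

theorem rstripD_eq_self {l : List Char} (h : ∀ a ∈ l, (['-'].contains a) = false) :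
    rstripD l = l := by
  rw [rstripD, List.dropWhile_eq_self_iff.mpr, List.reverse_reverse]
  intro hx
  have hlen : l.length - 1 < l.length := by
    have : 0 < l.length := by simpa using hx
    omega
  have := h l[l.length - 1] (List.getElem_mem hlen)
  simpa using this

theorem stripChars_eq (s : List Char) :
    PySem.Chars.stripChars s ['-'] = rstripD (s.dropWhile (fun c => ['-'].contains c)) := rfl

theorem loopA_eq_go2 (cs : List Char) (p : Bool) :
    slugifyLoopA cs p = go2 (mappedOf cs) p := by
  induction cs generalizing p with
  | nil => rfl
  | cons ch rest ih =>
    by_cases ha : PySem.Chars.isalnum ch = true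
    · rw [slugifyLoopA, if_pos ha]
      rw [show mappedOf (ch :: rest) = ch :: mappedOf rest from by
        simp [mappedOf, List.filter_cons, ha]]
      rw [go2, if_neg (by simp [alnum_ne_space ha]), ih]
    · have ha' : PySem.Chars.isalnum ch = false := by simpa using ha
      rw [slugifyLoopA, if_neg (by simp [ha'])]
      by_cases hsep : (ch == ' ' || ch == '-' || ch == '_') = true
      · rw [if_pos hsep]
        rw [show mappedOf (ch :: rest) = ' ' :: mappedOf rest from by
          simp [mappedOf, List.filter_cons, ha', hsep]]
        rw [go2]
        simp only [BEq.rfl, if_pos]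
        cases p <;> simp [ih]
      · have hsep' : (ch == ' ' || ch == '-' || ch == '_') = false := by simpa using hsep
        rw [if_neg (by simp [hsep'])]
        rw [show mappedOf (ch :: rest) = mappedOf rest from by
          simp [mappedOf, List.filter_cons, ha', hsep']]
        exact ih p

theorem ok_of_mapped (cs : List Char) : ∀ c ∈ mappedOf cs, okCh c := by
  intro c hc
  simp only [mappedOf, List.mem_map, List.mem_filter] at hc
  obtain ⟨a, ⟨-, -⟩, rfl⟩ := hc
  by_cases ha : PySem.Chars.isalnum a = true
  · exact Or.inl (by simp [ha])
  · exact Or.inr (by simp [ha])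

theorem contains_false_of_alnum {c : Char} (h : PySem.Chars.isalnum c = true) :
    (['-'].contains c) = false := by
  simp [beq_eq_false_iff_ne, alnum_ne_dash h]

theorem rstrip_go2 : ∀ (n : Nat) (m : List Char), m.length ≤ n → (∀ c ∈ m, okCh c) →
    (m = [] ∨ ∃ d t, m = d :: t ∧ PySem.Chars.isalnum d = true) →
    rstripD (go2 m false) = PySem.Chars.join ['-'] (wordsR m) := by
  intro n
  induction n with
  | zero =>
    intro m hm _ _
    have : m = [] := List.length_eq_zero_iff.mp (Nat.le_zero.mp hm)
    subst this
    rw [go2, wordsR, PySem.Chars.join_nil]; rfl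
  | succ n ih =>
    intro m hm hok hhead
    rcases hhead with rfl | ⟨d, t, rfl, hd⟩
    · rw [go2, wordsR, PySem.Chars.join_nil]; rfl
    · have hok_t : ∀ c ∈ t, okCh c := fun c hc => hok c (List.mem_cons_of_mem _ hc)
      set w := t.takeWhile (fun x => !(x == ' ')) with hw_def
      set r := t.dropWhile (fun x => !(x == ' ')) with hr_def
      have htw : w ++ r = t := List.takeWhile_append_dropWhile
      have hne_space_w : ∀ a ∈ w, (a == ' ') = false := by
        intro a ha
        have := List.mem_takeWhile_imp ha
        simpa using this
      have hok_w : ∀ a ∈ d :: w, (['-'].contains a) = false := by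
        intro a ha
        rcases List.mem_cons.mp ha with rfl | ha
        · exact contains_false_of_alnum hd
        · have hmem : a ∈ t := (List.takeWhile_sublist _).subset ha
          rcases hok_t a hmem with h | rfl
          · exact contains_false_of_alnum h
          · exact absurd (hne_space_w _ ha) (by simp)
      have hgo : go2 (d :: t) false = (d :: w) ++ go2 r false := by
        rw [show d :: t = (d :: w) ++ r from by rw [List.cons_append, htw]]
        refine go2_word (d :: w) r ?_
        intro a ha
        rcases List.mem_cons.mp ha with rfl | ha
        · exact alnum_ne_space hd
        · exact hne_space_w a ha
      have hwords : wordsR (d :: t) = (d :: w) :: wordsR r := by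
        rw [wordsR, if_neg (by simp [alnum_not_space hd]),
          takeWhile_congr_ok t hok_t, dropWhile_congr_ok t hok_t]
      cases hr : r with
      | nil =>
        rw [hgo, hr, hwords, hr]
        rw [show go2 [] false = [] from rfl, List.append_nil]
        rw [show wordsR [] = [] from by rw [wordsR]]
        rw [PySem.Chars.join_singleton]
        exact rstripD_eq_self hok_w
      | cons e r1 =>
        have he : e = ' ' := by
          have := dropWhile_head_false _ t r1 e (by rw [← hr_def, hr])
          simpa using this
        set r2 := r1.dropWhile (fun x => x == ' ') with hr2_def
        have hok_r : ∀ c ∈ r, okCh c := fun c hc =>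
          hok_t c ((List.dropWhile_sublist _).subset hc)
        have hok_r2 : ∀ c ∈ r2, okCh c := by
          intro c hc
          have : c ∈ r1 := (List.dropWhile_sublist _).subset hc
          exact hok_r c (by rw [hr]; exact List.mem_cons_of_mem _ this)
        have hgor : go2 r false = '-' :: go2 r2 false := by
          rw [hr, he, go2]
          simp only [BEq.rfl, if_pos, Bool.not_false]
          rw [go2_true_eq]
        have hwr : wordsR r = wordsR r2 := by
          rw [hr, he, wordsR_space_cons, ← wordsR_dropWhile_space r1]
        have hlen2 : r2.length ≤ n := by
          have h1 : r2.length ≤ r1.length := List.length_dropWhile_le _ _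
          have h2 : r.length ≤ t.length := by rw [hr_def]; exact List.length_dropWhile_le _ _
          have h3 : t.length + 1 ≤ n + 1 := by simpa using hm
          rw [hr] at h2
          simp at h2
          omega
        cases hr2 : r2 with
        | nil =>
          rw [hgo, hgor, hr2]
          rw [show go2 [] false = [] from rfl]
          rw [show (d :: w) ++ '-' :: ([] : List Char) = (d :: w) ++ ['-'] from rfl]
          rw [rstripD_append_dash, rstripD_eq_self hok_w]
          rw [hwords, hwr, hr2, show wordsR [] = [] from by rw [wordsR],
            PySem.Chars.join_singleton]
        | cons e2 t2 =>
          have he2 : (e2 == ' ') = false := by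
            have := dropWhile_head_false _ r1 t2 e2 (by rw [← hr2_def, hr2])
            simpa using this
          have he2alnum : PySem.Chars.isalnum e2 = true := by
            rcases hok_r2 e2 (by rw [hr2]; exact List.mem_cons_self ..) with h | rfl
            · exact h
            · exact absurd he2 (by simp)
          have IH := ih r2 hlen2 hok_r2 (Or.inr ⟨e2, t2, hr2, he2alnum⟩)
          have hgo2r2 : go2 r2 false = e2 :: go2 t2 false := by
            rw [hr2, go2, if_neg (by simp [he2])]
          have hne1 : rstripD (go2 r2 false) ≠ [] := by
            rw [hgo2r2]
            exact rstripD_ne_nil (List.mem_cons_self ..) (contains_false_of_alnum he2alnum)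
          have hz : rstripD ('-' :: go2 r2 false) = '-' :: rstripD (go2 r2 false) :=
            rstripD_append (x := ['-']) hne1
          have hne2 : rstripD ('-' :: go2 r2 false) ≠ [] := by rw [hz]; simp
          have hwords2 : wordsR r2 =
              (e2 :: t2.takeWhile (fun x => !PySem.Chars.isspace x)) ::
                wordsR (t2.dropWhile (fun x => !PySem.Chars.isspace x)) := by
            rw [hr2, wordsR, if_neg (by simp [alnum_not_space he2alnum])]
          rw [hgo, hgor, rstripD_append hne2, hz, IH, hwords, hwr, hwords2,
            PySem.Chars.join_cons_cons, ← hwords2]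
          simp

theorem strip_go2_eq_join (m : List Char) (hok : ∀ c ∈ m, okCh c) :
    PySem.Chars.stripChars (go2 m false) ['-'] = PySem.Chars.join ['-'] (wordsR m) := by
  cases m with
  | nil => rw [wordsR, PySem.Chars.join_nil]; rfl
  | cons c t =>
    have hok_t : ∀ x ∈ t, okCh x := fun x hx => hok x (List.mem_cons_of_mem _ hx)
    rcases hok c (List.mem_cons_self ..) with hd | rfl
    · have hgo : go2 (c :: t) false = c :: go2 t false := by
        rw [go2, if_neg (by simp [alnum_ne_space hd])]
      rw [stripChars_eq, hgo, List.dropWhile_cons,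
        if_neg (by rw [contains_false_of_alnum hd]; simp), ← hgo]
      exact rstrip_go2 (c :: t).length _ le_rfl hok (Or.inr ⟨c, t, rfl, hd⟩)
    · set m' := t.dropWhile (fun x => x == ' ') with hm'_def
      have hgo : go2 (' ' :: t) false = '-' :: go2 m' false := by
        rw [go2]
        simp only [BEq.rfl, if_pos, Bool.not_false]
        rw [go2_true_eq]
      have hok_m' : ∀ x ∈ m', okCh x := fun x hx =>
        hok_t x ((List.dropWhile_sublist _).subset hx)
      have hwr : wordsR (' ' :: t) = wordsR m' := by
        rw [wordsR_space_cons, ← wordsR_dropWhile_space t]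
      rw [stripChars_eq, hgo, List.dropWhile_cons, if_pos (by simp), hwr]
      cases hm' : m' with
      | nil => rw [show go2 [] false = [] from rfl, show wordsR [] = [] from by rw [wordsR],
          PySem.Chars.join_nil]; rfl
      | cons d t1 =>
        have hdns : (d == ' ') = false := by
          have := dropWhile_head_false _ t t1 d (by rw [← hm'_def, hm'])
          simpa using this
        have hdal : PySem.Chars.isalnum d = true := by
          rcases hok_m' d (by rw [hm']; exact List.mem_cons_self ..) with h | rfl
          · exact h
          · exact absurd hdns (by simp)
        have hgo' : go2 m' false = d :: go2 t1 false := by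
          rw [hm', go2, if_neg (by simp [hdns])]
        rw [← hm', hgo', List.dropWhile_cons,
          if_neg (by rw [contains_false_of_alnum hdal]; simp), ← hgo']
        exact rstrip_go2 m'.length m' le_rfl hok_m' (Or.inr ⟨d, t1, hm', hdal⟩)

-- ===== VERDICT (by name: the statement is the Claim_ definition above) =====
theorem slugify_sc_user_spec : Claim_equal_slugify_sc_user := by
  intro name _
  unfold Spec_slugify_sc_user slugify_sc_user slugify_sc_user_alt
  simp only [PySem.Str.stripChars, String.toList_ofList]
  have hdash : ("-" : String).toList = ['-'] := rfl
  rw [hdash, loopA_eq_go2, split0_eq_wordsR]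
  exact congrArg String.ofList (strip_go2_eq_join _ (ok_of_mapped _))
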